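-- pv_equiv track=rewrite | github.com/ieeta-pt/HYMET | scripts/prepare_mutation_dataset.py | build_lineage
-- ===== SOURCE A (Python) =====
-- from typing import Dict, List, Optional, Tuple
--
-- RANKS = ["superkingdom", "phylum", "class", "order", "family", "genus", "species"]
--
-- def build_lineage(
--     taxid: str,
--     tax_name: Dict[str, str],
--     tax_parent: Dict[str, Optional[str]],
--     tax_rank: Dict[str, str],
-- ) -> Tuple[List[Optional[str]], List[str]]:
--     taxids: List[Optional[str]] = [None] * len(RANKS)
--     names: List[str] = [""] * len(RANKS)
--     current = taxid
--     visited = set()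
--     while current and current not in visited:
--         visited.add(current)
--         rank = tax_rank.get(current)
--         if rank in RANKS:
--             idx = RANKS.index(rank)
--             if taxids[idx] is None:
--                 taxids[idx] = current
--                 names[idx] = tax_name.get(current, "")
--         current = tax_parent.get(current)
--     return taxids, names
-- ===== SOURCE B (Python) =====
-- from typing import Dict, List, Optional, Tuple
--
-- RANKS = ["superkingdom", "phylum", "class", "order", "family", "genus", "species"]
--
--
-- def _walk(cur, tax_parent, seen):
--     """Recursively collect the parent chain (same stop rule as A's loop)."""
--     if not cur or cur in seen:
--         return []
--     seen.add(cur)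
--     return [cur] + _walk(tax_parent.get(cur), tax_parent, seen)
--
--
-- def build_lineage(
--     taxid: str,
--     tax_name: Dict[str, str],
--     tax_parent: Dict[str, Optional[str]],
--     tax_rank: Dict[str, str],
-- ) -> Tuple[List[Optional[str]], List[str]]:
--     path = _walk(taxid, tax_parent, set())
--     by_rank = {}
--     for node in path:
--         r = tax_rank.get(node)
--         if r in RANKS and r not in by_rank:
--             by_rank[r] = (node, tax_name.get(node, ""))
--     taxids = [by_rank[r][0] if r in by_rank else None for r in RANKS]
--     names = [by_rank[r][1] if r in by_rank else "" for r in RANKS]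
--     return taxids, names
-- ===== Notes on version B (the rewrite author's own statement) =====
-- stated objective: alternative
-- what changed: Replaces A's single loop that updates positional None/"" slots in place with a recursive walk collecting the parent-chain path, a second pass indexing the path by rank name into a first-occurrence dict, and comprehensions that build both output lists by rank lookup.
import Mathlib
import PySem

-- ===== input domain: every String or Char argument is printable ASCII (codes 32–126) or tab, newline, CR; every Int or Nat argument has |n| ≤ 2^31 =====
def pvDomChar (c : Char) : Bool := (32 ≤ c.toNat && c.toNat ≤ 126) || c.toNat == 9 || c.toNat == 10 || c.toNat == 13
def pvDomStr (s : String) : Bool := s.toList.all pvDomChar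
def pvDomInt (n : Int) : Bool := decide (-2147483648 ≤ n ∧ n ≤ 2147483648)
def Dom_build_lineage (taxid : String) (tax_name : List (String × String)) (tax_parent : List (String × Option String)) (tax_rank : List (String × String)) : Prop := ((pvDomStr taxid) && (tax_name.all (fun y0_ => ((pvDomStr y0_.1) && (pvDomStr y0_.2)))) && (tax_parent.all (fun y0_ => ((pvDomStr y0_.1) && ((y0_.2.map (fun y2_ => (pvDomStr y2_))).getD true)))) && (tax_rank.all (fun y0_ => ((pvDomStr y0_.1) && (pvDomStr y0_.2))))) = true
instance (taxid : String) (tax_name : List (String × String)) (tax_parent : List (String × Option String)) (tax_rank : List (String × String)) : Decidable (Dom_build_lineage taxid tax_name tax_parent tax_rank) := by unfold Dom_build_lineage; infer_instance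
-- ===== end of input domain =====

-- B replaces A's in-place positional-slot loop by a path-collecting recursive walk plus a
-- rank-keyed first-occurrence dict and per-rank lookups (alternative decomposition, same cost).

def RANKS : List String :=
  ["superkingdom", "phylum", "class", "order", "family", "genus", "species"]

-- ===== PORT A =====
-- body of A's while-loop (the rank-slot update), as a helper
def stepA (tax_name tax_rank : List (String × String))
    (st : List (Option String) × List String) (cur : String) :
    List (Option String) × List String :=
  match (PySem.Dict.mk tax_rank).get? cur with
  | some r =>
    if r ∈ RANKS then
      let idx := (PySem.List.index? RANKS r).getD 0
      if st.1.getD idx none = none then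
        (st.1.set idx (some cur),
         st.2.set idx (((PySem.Dict.mk tax_name).get? cur).getD ""))
      else st
    else st
  | none => st

-- A's while-loop; fuel (tax_parent.length + 2) is an upper bound on the iterations, the
-- visited-set stop makes more impossible, so the 0-fuel branch is unreachable
def loopA (tax_name : List (String × String)) (tax_parent : List (String × Option String))
    (tax_rank : List (String × String)) :
    Nat → Option String → PySem.Set String → List (Option String) × List String →
    List (Option String) × List String
  | 0, _, _, st => st
  | fuel+1, cur?, visited, st =>
    match cur? with
    | none => st
    | some cur =>
      if cur = "" ∨ cur ∈ visited then st
      else loopA tax_name tax_parent tax_rank fuel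
        (((PySem.Dict.mk tax_parent).get? cur).join)
        (PySem.Set.add visited cur)
        (stepA tax_name tax_rank st cur)

def build_lineage (taxid : String) (tax_name : List (String × String))
    (tax_parent : List (String × Option String)) (tax_rank : List (String × String)) :
    List (Option String) × List String :=
  loopA tax_name tax_parent tax_rank (tax_parent.length + 2) (some taxid)
    PySem.Set.empty (List.replicate RANKS.length none, List.replicate RANKS.length "")

-- ===== PORT B =====
-- recursive parent-chain walk (Source B's _walk); same fuel bound, 0-fuel branch unreachable
def walkB (tax_parent : List (String × Option String)) :
    Nat → Option String → PySem.Set String → List String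
  | 0, _, _ => []
  | fuel+1, cur?, seen =>
    match cur? with
    | none => []
    | some cur =>
      if cur = "" ∨ cur ∈ seen then []
      else cur :: walkB tax_parent fuel
        (((PySem.Dict.mk tax_parent).get? cur).join)
        (PySem.Set.add seen cur)

-- body of Source B's for-loop building the rank-keyed first-occurrence dict
def stepB (tax_name tax_rank : List (String × String))
    (d : PySem.Dict String (String × String)) (node : String) :
    PySem.Dict String (String × String) :=
  match (PySem.Dict.mk tax_rank).get? node with
  | some r =>
    if r ∈ RANKS ∧ d.get? r = none then
      d.insert r (node, ((PySem.Dict.mk tax_name).get? node).getD "")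
    else d
  | none => d

def build_lineage_alt (taxid : String) (tax_name : List (String × String))
    (tax_parent : List (String × Option String)) (tax_rank : List (String × String)) :
    List (Option String) × List String :=
  let path := walkB tax_parent (tax_parent.length + 2) (some taxid) PySem.Set.empty
  let d := path.foldl (stepB tax_name tax_rank) PySem.Dict.empty
  (RANKS.map (fun r => (d.get? r).map (·.1)),
   RANKS.map (fun r => ((d.get? r).map (·.2)).getD ""))

-- ===== PRECONDITION & SPEC =====
def Spec_build_lineage (taxid : String) (tax_name : List (String × String)) (tax_parent : List (String × Option String)) (tax_rank : List (String × String)) (out : List (Option String) × List String) : Prop := out = build_lineage_alt taxid tax_name tax_parent tax_rank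
instance (taxid : String) (tax_name : List (String × String)) (tax_parent : List (String × Option String)) (tax_rank : List (String × String)) (out : List (Option String) × List String) : Decidable (Spec_build_lineage taxid tax_name tax_parent tax_rank out) := by unfold Spec_build_lineage; infer_instance

-- ===== CLAIM (what is proved, stated in full; the proofs are below) =====
def Claim_equal_build_lineage : Prop := ∀ (taxid : String) (tax_name : List (String × String)) (tax_parent : List (String × Option String)) (tax_rank : List (String × String)), Dom_build_lineage taxid tax_name tax_parent tax_rank → Spec_build_lineage taxid tax_name tax_parent tax_rank (build_lineage taxid tax_name tax_parent tax_rank)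

-- ===== LEMMAS AND PROOFS =====

-- A's loop is the fold of its body over the path B's walk collects
theorem loopA_eq_foldl_walkB (tax_name : List (String × String))
    (tax_parent : List (String × Option String)) (tax_rank : List (String × String)) :
    ∀ (fuel : Nat) (cur? : Option String) (seen : PySem.Set String)
      (st : List (Option String) × List String),
      loopA tax_name tax_parent tax_rank fuel cur? seen st =
        (walkB tax_parent fuel cur? seen).foldl (stepA tax_name tax_rank) st := by
  intro fuel
  induction fuel with
  | zero => intro cur? seen st; rfl
  | succ n ih =>
    intro cur? seen st
    cases cur? with
    | none => rfl
    | some cur =>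
      simp only [loopA, walkB]
      split
      · rfl
      · simp only [List.foldl]; exact ih _ _ _

-- the invariant tying A's positional slots to B's rank dict
def LinRel (d : PySem.Dict String (String × String))
    (st : List (Option String) × List String) : Prop :=
  st = (RANKS.map (fun r => (d.get? r).map (·.1)),
        RANKS.map (fun r => ((d.get? r).map (·.2)).getD ""))

theorem LinRel_step (tax_name tax_rank : List (String × String))
    (d : PySem.Dict String (String × String)) (st : List (Option String) × List String)
    (node : String) (h : LinRel d st) :
    LinRel (stepB tax_name tax_rank d node) (stepA tax_name tax_rank st node) := by
  subst h
  unfold stepA stepB LinRel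
  cases hr : (PySem.Dict.mk tax_rank).get? node with
  | none => rfl
  | some r =>
    simp only
    by_cases hm : r ∈ RANKS
    · cases hd : d.get? r with
      | none =>
        fin_cases hm <;>
          simp [RANKS, PySem.List.index?, List.idxOf?, List.findIdx?, List.findIdx?.go, hd, PySem.Dict.get?_insert, List.getD]
      | some v =>
        fin_cases hm <;>
          simp [RANKS, PySem.List.index?, List.idxOf?, List.findIdx?, List.findIdx?.go, hd, List.getD]
    · simp [hm]

theorem LinRel_foldl (tax_name tax_rank : List (String × String)) :
    ∀ (path : List String) (d : PySem.Dict String (String × String))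
      (st : List (Option String) × List String), LinRel d st →
      LinRel (path.foldl (stepB tax_name tax_rank) d)
          (path.foldl (stepA tax_name tax_rank) st) := by
  intro path
  induction path with
  | nil => intro d st h; exact h
  | cons x xs ih =>
    intro d st h
    exact ih _ _ (LinRel_step tax_name tax_rank d st x h)

theorem LinRel_empty :
    LinRel PySem.Dict.empty (List.replicate RANKS.length none, List.replicate RANKS.length "") := by
  unfold LinRel
  rfl

-- ===== VERDICT (by name: the statement is the Claim_ definition above) =====
theorem build_lineage_spec : Claim_equal_build_lineage := by
  intro taxid tax_name tax_parent tax_rank _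
  unfold Spec_build_lineage build_lineage build_lineage_alt
  rw [loopA_eq_foldl_walkB]
  exact LinRel_foldl tax_name tax_rank _ _ _ LinRel_empty
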